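-- pv_equiv track=rewrite | github.com/geobius/pyrSOS | training_utilities/dataloaders.py | partial_rename
-- ===== SOURCE A (Python) =====
-- def partial_rename(image_name, which_components, new_values):
--     naming_components = image_name.split('_')
--     index_matching_table = {
--         'area': 0,
--         'platform': 1,
--         'time': 2,
--         'gsd': 3,
--         'labelstatus': 4,
--         'row_ID': 5,
--         'column_ID': 6}
--
--     indices = [index_matching_table[x] for x in which_components]
--     for idx, val in zip(indices, new_values):
--         naming_components[idx] = val
--     new_name = '_'. join(naming_components)
--     return new_name
-- ===== SOURCE B (Python) =====
-- FIELDS = ['area', 'platform', 'time', 'gsd', 'labelstatus', 'row_ID', 'column_ID']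
--
--
-- def partial_rename(image_name, which_components, new_values):
--     pairs = list(zip(which_components, new_values))
--     out = []
--     for pos, comp in enumerate(image_name.split('_')):
--         field = FIELDS[pos] if pos < len(FIELDS) else None
--         val = comp
--         for name, v in pairs:  # later matches win, like A's sequential writes
--             if name == field:
--                 val = v
--         out.append(val)
--     return '_'.join(out)
-- ===== Notes on version B (the rewrite author's own statement) =====
-- stated objective: alternative
-- what changed: B inverts the loop structure: it never computes target indices at all; for each split position it derives the field name from a fixed FIELDS list and scans the (component, value) pairs for the last matching rename, instead of A's index-table lookup followed by in-place positional assignment.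
import Mathlib
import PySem

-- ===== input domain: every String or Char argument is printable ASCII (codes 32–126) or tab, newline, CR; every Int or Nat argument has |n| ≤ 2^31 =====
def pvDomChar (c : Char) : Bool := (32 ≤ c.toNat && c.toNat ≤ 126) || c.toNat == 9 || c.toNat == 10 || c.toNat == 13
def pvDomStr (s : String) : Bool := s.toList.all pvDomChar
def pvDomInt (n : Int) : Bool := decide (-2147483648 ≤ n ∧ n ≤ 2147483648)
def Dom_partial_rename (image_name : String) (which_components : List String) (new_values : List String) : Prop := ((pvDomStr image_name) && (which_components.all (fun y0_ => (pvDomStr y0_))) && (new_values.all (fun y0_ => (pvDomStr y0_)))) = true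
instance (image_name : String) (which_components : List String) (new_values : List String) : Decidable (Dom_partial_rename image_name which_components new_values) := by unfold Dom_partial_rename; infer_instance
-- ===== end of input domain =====

-- B inverts the loops: no index computation, per split position it derives the field name from a
-- fixed list and scans the (component, value) pairs for the last matching rename (objective:
-- alternative; a nested scan instead of table-lookup + positional assignment).

-- ===== PORT A =====
-- the index_matching_table literal of A
def prTable : PySem.Dict String Int :=
  PySem.Dict.ofList
    [("area", 0), ("platform", 1), ("time", 2), ("gsd", 3),
     ("labelstatus", 4), ("row_ID", 5), ("column_ID", 6)]

def partial_rename (image_name : String) (which_components : List String) (new_values : List String) : String :=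
  -- image_name.split('_'): split? is some (exact) because the separator is nonempty
  let naming_components := (PySem.Str.split? image_name "_").getD []
  -- [index_matching_table[x] for x in which_components]; KeyError excluded by Pre_
  let indices := which_components.map (fun x => prTable.getD x 0)
  -- for idx, val in zip(indices, new_values): naming_components[idx] = val; IndexError excluded by Pre_
  let final := (indices.zip new_values).foldl
      (fun acc iv => if 0 ≤ iv.1 ∧ iv.1.toNat < acc.length then acc.set iv.1.toNat iv.2 else acc)
      naming_components
  PySem.Str.join "_" final

-- ===== PORT B =====
-- B's fixed FIELDS list
def prFields : List String :=
  ["area", "platform", "time", "gsd", "labelstatus", "row_ID", "column_ID"]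

def partial_rename_alt (image_name : String) (which_components : List String) (new_values : List String) : String :=
  -- pairs = list(zip(which_components, new_values))
  let pairs := which_components.zip new_values
  -- for pos, comp in enumerate(image_name.split('_')): ... out.append(val)
  let out := (PySem.List.enumerate ((PySem.Str.split? image_name "_").getD [])).map
    (fun pc =>
      -- field = FIELDS[pos] if pos < len(FIELDS) else None
      let field : Option String :=
        if pc.1 < (prFields.length : Int) then PySem.List.pyGet? prFields pc.1 else none
      -- inner loop: later matches win
      pairs.foldl (fun val nv => if some nv.1 == field then nv.2 else val) pc.2)
  PySem.Str.join "_" out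

-- ===== PRECONDITION & SPEC =====
-- Pre_ excludes exactly the inputs where A raises: a KeyError (a component name outside the
-- table) or an IndexError (a zipped index not below the number of '_'-separated components).
def Pre_partial_rename (image_name : String) (which_components : List String) (new_values : List String) : Prop :=
  (∀ x ∈ which_components, prTable.contains x = true) ∧
  (∀ iv ∈ (which_components.map (fun x => prTable.getD x 0)).zip new_values,
      0 ≤ iv.1 ∧ iv.1.toNat < ((PySem.Str.split? image_name "_").getD []).length)
instance (image_name : String) (which_components : List String) (new_values : List String) : Decidable (Pre_partial_rename image_name which_components new_values) := by
  unfold Pre_partial_rename; infer_instance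

def pvWitness_partial_rename : String × List String × List String :=
  ("lesbos_drone_2021_5cm_labeled_3_4", ["area", "time"], ["x", "y"])

def Spec_partial_rename (image_name : String) (which_components : List String) (new_values : List String) (out : String) : Prop := out = partial_rename_alt image_name which_components new_values
instance (image_name : String) (which_components : List String) (new_values : List String) (out : String) : Decidable (Spec_partial_rename image_name which_components new_values out) := by unfold Spec_partial_rename; infer_instance

-- ===== CLAIM =====
def Claim_equal_partial_rename : Prop := ∀ (image_name : String) (which_components : List String) (new_values : List String), Dom_partial_rename image_name which_components new_values → Pre_partial_rename image_name which_components new_values → Spec_partial_rename image_name which_components new_values (partial_rename image_name which_components new_values)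

-- ===== LEMMAS AND PROOFS =====

-- element k of A's assignment loop = fold of "last pair whose index is k" over the same pairs
lemma pr_loop_getElem? (pairs : List (Int × String)) (cs : List String)
    (h : ∀ p ∈ pairs, 0 ≤ p.1 ∧ p.1.toNat < cs.length) (k : Nat) :
    (pairs.foldl
        (fun acc iv => if 0 ≤ iv.1 ∧ iv.1.toNat < acc.length then acc.set iv.1.toNat iv.2 else acc)
        cs)[k]?
      = cs[k]?.map (fun c => pairs.foldl (fun v iv => if iv.1.toNat = k then iv.2 else v) c) := by
  induction pairs generalizing cs with
  | nil => cases hcs : cs[k]? <;> simp [hcs]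
  | cons p rest ih =>
    obtain ⟨h0, h1⟩ := h p (List.mem_cons_self ..)
    simp only [List.foldl_cons]
    rw [if_pos ⟨h0, h1⟩,
      ih (cs.set p.1.toNat p.2)
        (fun q hq => by simpa using h q (List.mem_cons_of_mem _ hq))]
    by_cases hik : p.1.toNat = k
    · subst hik
      rw [List.getElem?_set_self (by omega), List.getElem?_eq_getElem h1]
      simp
    · rw [List.getElem?_set_ne hik]
      cases hcs : cs[k]? <;> simp [hik]

-- the name test against FIELDS[k] equals the index test against the table value
lemma pr_cond_eq (x : String) (hx : prTable.contains x = true) (k : Nat) :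
    (some x == (if (k : Int) < (prFields.length : Int)
        then PySem.List.pyGet? prFields (k : Int) else none))
      = decide ((prTable.getD x 0).toNat = k) := by
  have hx' : x = "area" ∨ x = "platform" ∨ x = "time" ∨ x = "gsd" ∨
      x = "labelstatus" ∨ x = "row_ID" ∨ x = "column_ID" := by
    have h := (PySem.Dict.contains_iff_mem_keys prTable x).mp hx
    rw [show prTable.keys = ["area", "platform", "time", "gsd",
        "labelstatus", "row_ID", "column_ID"] from by decide] at h
    simpa using h
  by_cases hk7 : k < 7
  · interval_cases k <;> rcases hx' with h|h|h|h|h|h|h <;> subst h <;> decide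
  · have hlt : (prTable.getD x 0).toNat < 7 := by
      rcases hx' with h|h|h|h|h|h|h <;> subst h <;> decide
    have hcond : ¬ ((k : Int) < (prFields.length : Int)) := by
      simp only [prFields, List.length]
      omega
    rw [if_neg hcond]
    have hne : (prTable.getD x 0).toNat ≠ k := by omega
    simp [hne]

-- B's inner name-scan = the index-fold over the mapped pairs
lemma pr_scan_eq (pairs : List (String × String))
    (hmem : ∀ p ∈ pairs, prTable.contains p.1 = true) (k : Nat) (v : String) :
    pairs.foldl
        (fun val nv => if some nv.1 == (if (k : Int) < (prFields.length : Int)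
            then PySem.List.pyGet? prFields (k : Int) else none) then nv.2 else val) v
      = (pairs.map (fun p => (prTable.getD p.1 0, p.2))).foldl
          (fun v iv => if iv.1.toNat = k then iv.2 else v) v := by
  induction pairs generalizing v with
  | nil => rfl
  | cons p rest ih =>
    simp only [List.foldl_cons, List.map_cons]
    rw [pr_cond_eq p.1 (hmem p (List.mem_cons_self ..)) k]
    simp only [decide_eq_true_eq]
    exact ih (fun q hq => hmem q (List.mem_cons_of_mem _ hq)) _

-- ===== VERDICT =====
theorem partial_rename_spec : Claim_equal_partial_rename := by
  intro image_name which_components new_values _ hpre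
  obtain ⟨hkeys, hz⟩ := hpre
  unfold Spec_partial_rename partial_rename partial_rename_alt
  simp only []
  congr 1
  set cs := (PySem.Str.split? image_name "_").getD [] with hcs
  have hzip : (which_components.map (fun x => prTable.getD x 0)).zip new_values
      = (which_components.zip new_values).map (fun p => (prTable.getD p.1 0, p.2)) := by
    rw [List.zip_map_left]; rfl
  have hkeys' : ∀ p ∈ which_components.zip new_values, prTable.contains p.1 = true := by
    intro p hp
    exact hkeys p.1 (List.of_mem_zip hp).1
  apply List.ext_getElem?
  intro k
  rw [pr_loop_getElem? _ _ (fun p hp => hz p hp) k]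
  rw [List.getElem?_map, PySem.List.getElem?_enumerate]
  rw [hzip]
  cases hck : cs[k]? with
  | none => simp
  | some c =>
    simp only [Option.map_some]
    congr 1
    simp only [zero_add]
    rw [pr_scan_eq _ hkeys' k c]
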